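-- pv_equiv track=rewrite | github.com/maximilian-janisch/2020-UZH-Random-Forests | RandomForestImplementation/multiclass.py | get_relabel
-- ===== SOURCE A (Python) =====
-- def get_relabel(iterable):
--     # "Factorizes" the data in iterable. For example [0,1,5,3,5,0] gets a mapper to [0,1,2,3,2,0]
--     dct = {}
--     largest = 0
--     for element in iterable:
--         if element in dct:
--             continue
--         dct[element] = largest
--         largest += 1
--     return dct
-- ===== SOURCE B (Python) =====
-- def get_relabel(iterable):
--     # Reverse sweep: record each element's position, iterating back-to-front so
--     # the earliest position is the one that survives; then sort the elements by
--     # that first-occurrence position and label each by its rank.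
--     lst = list(iterable)
--     first_pos = {}
--     for pos, el in reversed(list(enumerate(lst))):
--         first_pos[el] = pos
--     order = sorted(first_pos, key=first_pos.get)
--     return {el: rank for rank, el in enumerate(order)}
-- ===== Notes on version B (the rewrite author's own statement) =====
-- stated objective: alternative
-- what changed: Instead of A's single pass that skips seen elements while bumping a manual counter, B sweeps the list back-to-front recording each element's surviving (first-occurrence) position in a dict, sorts the distinct elements by that position, and labels each by its rank; correct because first-occurrence positions are distinct, so sorting by them reproduces first-appearance order.
import Mathlib
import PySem

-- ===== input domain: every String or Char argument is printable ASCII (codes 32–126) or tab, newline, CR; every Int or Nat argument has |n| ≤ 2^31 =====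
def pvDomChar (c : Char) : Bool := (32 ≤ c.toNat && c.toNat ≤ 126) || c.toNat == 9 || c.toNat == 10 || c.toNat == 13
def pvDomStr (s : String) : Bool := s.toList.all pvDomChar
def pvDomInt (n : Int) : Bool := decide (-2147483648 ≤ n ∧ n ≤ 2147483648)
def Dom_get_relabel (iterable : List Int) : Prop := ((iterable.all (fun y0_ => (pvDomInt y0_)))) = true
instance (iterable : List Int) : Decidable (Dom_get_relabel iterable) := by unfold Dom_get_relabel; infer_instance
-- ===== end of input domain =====

-- B replaces A's seen-skipping counter loop by a reverse sweep recording first-occurrence positions,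
-- then a sort of the distinct elements by that position and ranking (alternative algorithm; same value).

-- ===== PORT A =====
-- one pass: skip seen elements, otherwise record element ↦ largest and bump largest
def get_relabel (iterable : List Int) : List (Int × Int) :=
  (iterable.foldl
    (fun st element =>
      if st.1.contains element then st
      else (st.1.insert element st.2, st.2 + 1))
    ((PySem.Dict.empty : PySem.Dict Int Int), (0 : Int))).1.items

-- ===== PORT B =====
-- reversed(list(enumerate(lst))) sweep: later (earlier-position) writes win;
-- first_pos.get el is always a value for keys of first_pos, so getD 0 is exact there (default never taken)
def get_relabel_alt (iterable : List Int) : List (Int × Int) :=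
  let lst := iterable
  let first_pos := (PySem.List.enumerate lst 0).reverse.foldl
      (fun d p => d.insert p.2 p.1) (PySem.Dict.empty : PySem.Dict Int Int)
  let order := PySem.List.sorted first_pos.keys
      (fun el => (first_pos.get? el).getD 0) false
  ((PySem.List.enumerate order 0).foldl
    (fun d p => d.insert p.2 p.1)
    (PySem.Dict.empty : PySem.Dict Int Int)).items

-- ===== PRECONDITION & SPEC =====
def Spec_get_relabel (iterable : List Int) (out : List (Int × Int)) : Prop := out = get_relabel_alt iterable
instance (iterable : List Int) (out : List (Int × Int)) : Decidable (Spec_get_relabel iterable out) := by unfold Spec_get_relabel; infer_instance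

-- ===== CLAIM (what is proved, stated in full; the proofs are below) =====
def Claim_equal_get_relabel : Prop := ∀ (iterable : List Int), Dom_get_relabel iterable → Spec_get_relabel iterable (get_relabel iterable)

-- ===== LEMMAS AND PROOFS =====

-- the fold over pairs inserting p.2 ↦ p.1: lookup is decided by the LAST matching pair,
-- i.e. the FIRST matching pair of the reversed pair list
lemma get?_foldl_insert_pairs (ps : List (Int × Int)) (d0 : PySem.Dict Int Int) (k : Int) :
    (ps.foldl (fun d p => d.insert p.2 p.1) d0).get? k
      = match ps.reverse.find? (fun p => p.2 == k) with
        | some p => some p.1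
        | none => d0.get? k := by
  induction ps generalizing d0 with
  | nil => simp
  | cons q qs ih =>
      rw [List.foldl_cons, ih, List.reverse_cons, List.find?_append]
      cases hfq : qs.reverse.find? (fun p => p.2 == k) with
      | some p => simp
      | none =>
          by_cases hk : q.2 = k
          · simp [hk, PySem.Dict.get?_insert_self]
          · rw [PySem.Dict.get?_insert_of_ne _ q.1 (fun h => hk h.symm)]
            simp [hk]

-- find? over enumerate is index?
lemma find?_enumerate (lst : List Int) (s : Int) (k : Int) :
    (PySem.List.enumerate lst s).find? (fun p => p.2 == k)
      = (PySem.List.index? lst k).map (fun n => ((s + (n : Int)), k)) := by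
  induction lst generalizing s with
  | nil => simp [PySem.List.enumerate_nil]
  | cons x xs ih =>
      rw [PySem.List.enumerate_cons]
      by_cases hx : x = k
      · subst hx
        rw [PySem.List.index?_cons_self]
        simp
      · rw [PySem.List.index?_cons_of_ne xs hx]
        rw [List.find?_cons_of_neg (by simpa using hx), ih (s + 1)]
        cases PySem.List.index? xs k with
        | none => simp
        | some n => simp; omega

-- the reverse sweep's dict looks up the FIRST-occurrence position
lemma get?_first_pos (lst : List Int) (k : Int) :
    ((PySem.List.enumerate lst 0).reverse.foldl (fun d p => d.insert p.2 p.1)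
        (PySem.Dict.empty : PySem.Dict Int Int)).get? k
      = (PySem.List.index? lst k).map (fun n => (n : Int)) := by
  rw [get?_foldl_insert_pairs, List.reverse_reverse, find?_enumerate]
  cases PySem.List.index? lst k with
  | none => simp [PySem.Dict.get?_empty]
  | some n => simp

-- first-occurrence positions strictly increase along the ordered dedup
lemma pairwise_index_ofList (lst : List Int) :
    (PySem.Set.ofList lst).Pairwise
      (fun a b => ((PySem.List.index? lst a).getD 0 : Nat) < ((PySem.List.index? lst b).getD 0 : Nat)) := by
  induction lst using List.reverseRecOn with
  | nil => simp [PySem.Set.ofList_nil]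
  | append_singleton xs x ih =>
      have hkey : ∀ y ∈ PySem.Set.ofList xs,
          PySem.List.index? (xs ++ [x]) y = PySem.List.index? xs y := by
        intro y hy
        exact PySem.List.index?_append_of_mem _ ((PySem.Set.mem_ofList _ _).mp hy)
      by_cases hx : x ∈ xs
      · rw [PySem.Set.ofList_append_singleton, PySem.Set.add_of_mem ((PySem.Set.mem_ofList _ _).mpr hx)]
        exact List.Pairwise.imp_of_mem
          (fun {a b} ha hb h => by rw [hkey a ha, hkey b hb]; exact h) ih
      · rw [PySem.Set.ofList_append_singleton,
            PySem.Set.add_of_not_mem (fun h => hx ((PySem.Set.mem_ofList _ _).mp h))]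
        rw [List.pairwise_append]
        refine ⟨List.Pairwise.imp_of_mem
          (fun {a b} ha hb h => by rw [hkey a ha, hkey b hb]; exact h) ih,
          List.pairwise_singleton _ _, ?_⟩
        intro a ha b hb
        rw [List.mem_singleton] at hb; subst hb
        rw [hkey a ha, PySem.List.index?_append_singleton_self xs b hx]
        have hmem : a ∈ xs := (PySem.Set.mem_ofList _ _).mp ha
        obtain ⟨k, hk⟩ := Option.isSome_iff_exists.mp ((PySem.List.index?_isSome_iff _ _).mpr hmem)
        obtain ⟨hlt, -, -⟩ := PySem.List.getElem_of_index?_eq_some hk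
        rw [hk]
        simpa using hlt

-- the sort by first-occurrence position reproduces the first-appearance dedup
lemma sorted_eq_dedup (lst : List Int) :
    PySem.List.sorted
      (((PySem.List.enumerate lst 0).reverse.foldl (fun d p => d.insert p.2 p.1)
          (PySem.Dict.empty : PySem.Dict Int Int)).keys)
      (fun el => (((PySem.List.enumerate lst 0).reverse.foldl (fun d p => d.insert p.2 p.1)
          (PySem.Dict.empty : PySem.Dict Int Int)).get? el).getD 0) false
    = PySem.List.dedup lst := by
  have hkeys : ((PySem.List.enumerate lst 0).reverse.foldl (fun d p => d.insert p.2 p.1)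
      (PySem.Dict.empty : PySem.Dict Int Int)).keys = PySem.Set.ofList lst.reverse := by
    rw [PySem.Dict.keys_foldl_insert_key]
    have : (PySem.List.enumerate lst 0).reverse.map (fun p => p.2) = lst.reverse := by
      rw [List.map_reverse]
      simp [PySem.List.map_snd_enumerate]
    rw [this, PySem.Dict.keys_empty, PySem.Set.update_nil_left]
  rw [hkeys]
  refine PySem.List.sorted_eq_of_perm_of_pairwise_lt _ _ _ ?_ ?_
  · rw [(List.perm_ext_iff_of_nodup (PySem.List.nodup_dedup lst) (PySem.Set.nodup_ofList _))]
    intro a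
    rw [PySem.List.mem_dedup, PySem.Set.mem_ofList, List.mem_reverse]
  · have hp := pairwise_index_ofList lst
    rw [← PySem.List.dedup_eq_ofList] at hp
    refine List.Pairwise.imp_of_mem (fun {a b} ha hb h => ?_) hp
    have hma : a ∈ lst := (PySem.List.mem_dedup _ _).mp ha
    have hmb : b ∈ lst := (PySem.List.mem_dedup _ _).mp hb
    obtain ⟨ka, hka⟩ := Option.isSome_iff_exists.mp ((PySem.List.index?_isSome_iff _ _).mpr hma)
    obtain ⟨kb, hkb⟩ := Option.isSome_iff_exists.mp ((PySem.List.index?_isSome_iff _ _).mpr hmb)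
    rw [get?_first_pos, get?_first_pos, hka, hkb]
    rw [hka, hkb] at h
    simpa using h

lemma enumerate_append_singleton (s : List Int) (x : Int) (k : Int) :
    PySem.List.enumerate (s ++ [x]) k
      = PySem.List.enumerate s k ++ [(k + s.length, x)] := by
  induction s generalizing k with
  | nil => simp [PySem.List.enumerate_cons, PySem.List.enumerate_nil]
  | cons y ys ih =>
      simp [PySem.List.enumerate_cons, ih]
      omega

lemma loop_items (xs : List Int) :
    ∀ (d : PySem.Dict Int Int) (s : List Int), s.Nodup →
    d.items = (PySem.List.enumerate s 0).map (fun p => (p.2, p.1)) →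
    (xs.foldl
      (fun st element =>
        if st.1.contains element then st
        else (st.1.insert element st.2, st.2 + 1))
      (d, (s.length : Int))).1.items
    = (PySem.List.enumerate (PySem.Set.update s xs) 0).map (fun p => (p.2, p.1)) := by
  induction xs with
  | nil => intro d s hnd h; simpa [PySem.Set.update] using h
  | cons x xs ih =>
      intro d s hnd h
      have hkeys : d.keys = s := by
        simp only [PySem.Dict.keys, h, List.map_map]
        simp [Function.comp_def]
      by_cases hc : d.contains x = true
      · have hx : x ∈ s := by rw [← hkeys]; exact (PySem.Dict.contains_iff_mem_keys d x).mp hc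
        rw [List.foldl_cons]
        simp only [hc, if_true]
        rw [PySem.Set.update_cons, PySem.Set.add_of_mem hx]
        exact ih d s hnd h
      · have hc' : d.contains x = false := Bool.not_eq_true _ ▸ eq_false_of_ne_true hc
        have hx : x ∉ s := fun hm => hc ((PySem.Dict.contains_iff_mem_keys d x).mpr (hkeys ▸ hm))
        rw [List.foldl_cons]
        simp only [hc', Bool.false_eq_true, if_false]
        rw [PySem.Set.update_cons, PySem.Set.add_of_not_mem hx]
        have hnd' : (s ++ [x]).Nodup := by
          simp [List.nodup_append, hnd]
          exact fun a ha hax => hx (hax ▸ ha)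
        have hitems : (d.insert x (s.length : Int)).items
            = (PySem.List.enumerate (s ++ [x]) 0).map (fun p => (p.2, p.1)) := by
          rw [PySem.Dict.items_insert_of_not_contains _ _ hc', h, enumerate_append_singleton]
          simp
        have hlen : ((s.length : Int) + 1) = (((s ++ [x]).length : Nat) : Int) := by
          simp
        rw [hlen]
        exact ih (d.insert x (s.length : Int)) (s ++ [x]) hnd' hitems

lemma alt_eq (xs : List Int) :
    get_relabel_alt xs
      = (PySem.List.enumerate (PySem.List.dedup xs) 0).map (fun p => (p.2, p.1)) := by
  show ((PySem.List.enumerate (PySem.List.sorted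
      (((PySem.List.enumerate xs 0).reverse.foldl (fun d p => d.insert p.2 p.1)
          (PySem.Dict.empty : PySem.Dict Int Int)).keys)
      (fun el => (((PySem.List.enumerate xs 0).reverse.foldl (fun d p => d.insert p.2 p.1)
          (PySem.Dict.empty : PySem.Dict Int Int)).get? el).getD 0) false) 0).foldl
    (fun d p => d.insert p.2 p.1)
    (PySem.Dict.empty : PySem.Dict Int Int)).items = _
  rw [sorted_eq_dedup]
  have hfresh := PySem.Dict.items_foldl_insert_fresh
      (PySem.List.enumerate (PySem.List.dedup xs) 0) (fun p => p.2) (fun p => p.1)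
      (PySem.Dict.empty : PySem.Dict Int Int)
      (fun a _ => @PySem.Dict.contains_empty Int Int _ a.2)
      (by rw [PySem.List.map_snd_enumerate]; exact PySem.List.nodup_dedup xs)
  simpa [PySem.Dict.empty] using hfresh

-- ===== VERDICT (by name: the statement is the Claim_ definition above) =====
theorem get_relabel_spec : Claim_equal_get_relabel := by
  intro xs _
  unfold Spec_get_relabel
  rw [alt_eq, PySem.List.dedup_eq_ofList, ← PySem.Set.update_nil_left]
  unfold get_relabel
  have := loop_items xs PySem.Dict.empty [] List.nodup_nil (by simp [PySem.Dict.empty, PySem.List.enumerate_nil])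
  simpa using this
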